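-- pv_equiv track=rewrite | github.com/martinwrl/AnalyseDeDonnees | lignebrisee.py | createWords
-- ===== SOURCE A (Python) =====
-- def createWords(l:list, n:int):
-- 	L = ['' for i in range(n)] 		# La liste des mots créés pour chaquue ligne
-- 	order = [i for i in range(n)]
-- 	for crois in l:
-- 		for i in range(n):
-- 			L[i] += 'hh'
-- 		L[order[crois]] = L[order[crois]][:-1] + 'd'
-- 		L[order[crois+1]] = L[order[crois+1]][:-1] + 'u'
-- 		order[crois], order[crois + 1] = order[crois + 1], order[crois]
-- 	for i in range(n):
-- 			L[i] += 'h'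
-- 	return L, order
-- ===== SOURCE B (Python) =====
-- def createWords(l, n):
--     # Phase 1: walk the crossings once, recording for each one the pair of
--     # line indices (d, u) that cross, while permuting `order`.
--     order = list(range(n))
--     events = []
--     for c in l:
--         d, u = order[c], order[c + 1]
--         events.append((d, u))
--         order[c], order[c + 1] = u, d
--     # Phase 2: render each line independently from the event table.
--     lines = [''.join('hu' if j == u else 'hd' if j == d else 'hh'
--                      for d, u in events) + 'h'
--              for j in range(n)]
--     return lines, order
-- ===== Notes on version B (the rewrite author's own statement) =====
-- stated objective: alternative
-- what changed: A mutates all n line strings in lockstep at every crossing (append 'hh' to every line, then slice-and-patch the two crossing lines); B first walks the crossings once building an explicit event table of (down,up) line indices plus the final order, then renders each line independently, column-major, from that table.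
import Mathlib
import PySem

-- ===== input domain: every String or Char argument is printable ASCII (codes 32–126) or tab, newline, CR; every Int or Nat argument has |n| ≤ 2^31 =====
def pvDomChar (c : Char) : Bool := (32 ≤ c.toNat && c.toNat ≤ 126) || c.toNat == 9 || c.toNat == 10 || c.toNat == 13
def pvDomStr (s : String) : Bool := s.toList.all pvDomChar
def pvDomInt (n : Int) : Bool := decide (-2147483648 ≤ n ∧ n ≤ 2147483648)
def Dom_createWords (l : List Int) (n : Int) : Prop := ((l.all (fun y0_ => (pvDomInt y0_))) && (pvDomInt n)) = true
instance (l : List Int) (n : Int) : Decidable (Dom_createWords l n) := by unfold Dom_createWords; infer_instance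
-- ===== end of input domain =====

-- B re-implements createWords as two phases (an explicit crossing-event table, then
-- column-major rendering of each line) instead of A's lockstep string mutation; same cost,
-- equivalence of the RETURN value is proved on inputs where A does not raise IndexError.

-- ===== PORT A =====
-- hand-ported loop "for i in range(n): L[i] += t": appends t to L[i] for each i in
-- range(n), walking L structurally; exact here because len(L) = n at every use site
def pvAddEach (t : String) : Int → List String → List String
  | _, [] => []
  | k, x :: xs => if 0 < k then (x ++ t) :: pvAddEach t (k - 1) xs else x :: xs

-- the body of A's 'for crois in l' loop; none = IndexError on order[crois] / order[crois+1]
def createWordsStep (n : Int) (st? : Option (List String × List Int)) (crois : Int) :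
    Option (List String × List Int) :=
  st?.bind fun st =>
    -- for i in range(n): L[i] += 'hh'
    let L := pvAddEach "hh" n st.1
    let order := st.2
    match PySem.List.pyGet? order crois, PySem.List.pyGet? order (crois + 1) with
    | some oc, some oc1 =>
        -- L[order[crois]] = L[order[crois]][:-1] + 'd'
        let L := PySem.List.pySetD L oc
          (PySem.Str.slice (PySem.List.pyGetD L oc "") none (some (-1)) ++ "d")
        -- L[order[crois+1]] = L[order[crois+1]][:-1] + 'u'
        let L := PySem.List.pySetD L oc1
          (PySem.Str.slice (PySem.List.pyGetD L oc1 "") none (some (-1)) ++ "u")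
        -- order[crois], order[crois+1] = order[crois+1], order[crois]
        some (L, PySem.List.pySetD (PySem.List.pySetD order crois oc1) (crois + 1) oc)
    | _, _ => none

def createWords (l : List Int) (n : Int) : List String × List Int :=
  -- L = ['' for i in range(n)]; order = [i for i in range(n)]
  match l.foldl (createWordsStep n)
      (some ((PySem.List.pyRange 0 n 1).map (fun _ => ""), PySem.List.pyRange 0 n 1)) with
  | some st => (pvAddEach "h" n st.1, st.2)  -- for i in range(n): L[i] += 'h' 
  | none => ([], [])  -- Python raises IndexError here; excluded by Pre_

-- ===== PORT B =====
-- ternary 'hu' if j == u else 'hd' if j == d else 'hh'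
def pvSeg (j : Int) (e : Int × Int) : String :=
  if j = e.2 then "hu" else if j = e.1 then "hd" else "hh"

-- the body of B's phase-1 loop; none = IndexError on order[c] / order[c+1]
def createWordsAltStep (st? : Option (List (Int × Int) × List Int)) (c : Int) :
    Option (List (Int × Int) × List Int) :=
  st?.bind fun st =>
    match PySem.List.pyGet? st.2 c, PySem.List.pyGet? st.2 (c + 1) with
    | some d, some u =>
        some (st.1 ++ [(d, u)],
              PySem.List.pySetD (PySem.List.pySetD st.2 c u) (c + 1) d)
    | _, _ => none

def createWords_alt (l : List Int) (n : Int) : List String × List Int :=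
  match l.foldl createWordsAltStep (some ([], PySem.List.pyRange 0 n 1)) with
  | some st =>
      ((PySem.List.pyRange 0 n 1).map
        (fun j => PySem.Str.join "" (st.1.map (pvSeg j)) ++ "h"), st.2)
  | none => ([], [])

-- ===== PRECONDITION & SPEC =====
-- Pre_ excludes exactly the inputs where A raises IndexError: some crossing index c in l
-- with c or c+1 outside the valid Python index range of the length-n list 'order'.
def Pre_createWords (l : List Int) (n : Int) : Prop :=
  ∀ c ∈ l, PySem.Raise.InRange n.toNat c ∧ PySem.Raise.InRange n.toNat (c + 1)
instance (l : List Int) (n : Int) : Decidable (Pre_createWords l n) := by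
  unfold Pre_createWords; infer_instance

def pvWitness_createWords : List Int × Int := ([0, 1, 0], 3)

def Spec_createWords (l : List Int) (n : Int) (out : List String × List Int) : Prop :=
  out = createWords_alt l n
instance (l : List Int) (n : Int) (out : List String × List Int) :
    Decidable (Spec_createWords l n out) := by unfold Spec_createWords; infer_instance

-- ===== CLAIM (what is proved, stated in full; the proofs are below) =====
def Claim_equal_createWords : Prop := ∀ (l : List Int) (n : Int), Dom_createWords l n →
  Pre_createWords l n → Spec_createWords l n (createWords l n)

-- ===== LEMMAS AND PROOFS =====

-- the string a line accumulates over an event list (B's per-line rendering)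
def pvRender (evs : List (Int × Int)) (j : Int) : String :=
  PySem.Str.join "" (evs.map (pvSeg j))

theorem pv_join_nil : PySem.Str.join "" ([] : List String) = "" := by
  simp [PySem.Str.join]

theorem pv_join_cons (a : String) (ys : List String) :
    PySem.Str.join "" (a :: ys) = a ++ PySem.Str.join "" ys := by
  apply String.toList_injective
  cases ys <;> simp [PySem.Chars.join, List.intercalate]

theorem pv_join_append_singleton (xs : List String) (s : String) :
    PySem.Str.join "" (xs ++ [s]) = PySem.Str.join "" xs ++ s := by
  induction xs with
  | nil => simp [pv_join_nil, pv_join_cons]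
  | cons a t ih => simp only [List.cons_append, pv_join_cons, ih, String.append_assoc]

theorem pv_slice_hh_d (s : String) :
    PySem.Str.slice (s ++ "hh") none (some (-1)) ++ "d" = s ++ "hd" := by
  apply String.toList_injective
  simp [PySem.List.slice_to_neg_one]

theorem pv_slice_hh_u (s : String) :
    PySem.Str.slice (s ++ "hh") none (some (-1)) ++ "u" = s ++ "hu" := by
  apply String.toList_injective
  simp [PySem.List.slice_to_neg_one]

theorem pv_slice_hd_u (s : String) :
    PySem.Str.slice (s ++ "hd") none (some (-1)) ++ "u" = s ++ "hu" := by
  apply String.toList_injective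
  simp [PySem.List.slice_to_neg_one]

theorem pv_mem_pySetD {α : Type} (xs : List α) (i : Int) (v x : α)
    (h : x ∈ PySem.List.pySetD xs i v) : x ∈ xs ∨ x = v := by
  unfold PySem.List.pySetD PySem.List.pySet? at h
  cases hk : PySem.List.pyIdx? xs.length i with
  | none => simp [hk] at h; exact Or.inl h
  | some k => simp [hk] at h; exact List.mem_or_eq_of_mem_set h

theorem pv_addEach_full (t : String) : ∀ (L : List String) (k : Int),
    (L.length : Int) ≤ k → pvAddEach t k L = L.map (· ++ t) := by
  intro L
  induction L with
  | nil => intro k _; rfl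
  | cons x xs ih =>
      intro k hk
      have hlen : ((x :: xs).length : Int) = (xs.length : Int) + 1 := by
        simp
      rw [pvAddEach, if_pos (by omega)]
      rw [ih (k - 1) (by omega)]
      rfl

theorem pv_addEach_map (t : String) (n : Int) (f : Int → String) :
    pvAddEach t n ((PySem.List.pyRange 0 n 1).map f)
    = (PySem.List.pyRange 0 n 1).map (fun j => f j ++ t) := by
  by_cases h : 0 ≤ n
  · rw [pv_addEach_full t _ n
      (by rw [List.length_map, PySem.List.length_pyRange_one]; omega), List.map_map]
    rfl
  · rw [PySem.List.pyRange_one_eq_nil (by omega)]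
    rfl

theorem pv_pySetD_map_pyRange {α : Type} (f : Int → α) (n i : Int) (v : α)
    (h0 : 0 ≤ i) (_h1 : i < n) :
    PySem.List.pySetD ((PySem.List.pyRange 0 n 1).map f) i v
    = (PySem.List.pyRange 0 n 1).map (fun j => if j = i then v else f j) := by
  rw [PySem.List.pySetD_of_nonneg _ _ h0]
  apply List.ext_getElem
  · simp
  · intro k hk1 hk2
    simp only [List.getElem_set, List.getElem_map, PySem.List.getElem_pyRange_one]
    have hiff : (i.toNat = k) ↔ ((0 : Int) + k = i) := by omega
    by_cases hc : i.toNat = k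
    · simp [hc, hiff.mp hc]
    · simp [hc]
      intro h
      exact absurd (hiff.mpr (by omega)) hc

-- one loop iteration of A, started on B's rendered state, is B's iteration rendered
theorem pv_step_eq (n : Int) (evs : List (Int × Int)) (order : List Int) (c : Int)
    (hb : ∀ x ∈ order, 0 ≤ x ∧ x < n) :
    createWordsStep n (some ((PySem.List.pyRange 0 n 1).map (pvRender evs), order)) c
    = Option.map (fun st => ((PySem.List.pyRange 0 n 1).map (pvRender st.1), st.2))
        (createWordsAltStep (some (evs, order)) c) := by
  unfold createWordsStep createWordsAltStep
  cases hd : PySem.List.pyGet? order c with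
  | none => simp [hd]
  | some d =>
    cases hu : PySem.List.pyGet? order (c + 1) with
    | none => simp [hd, hu]
    | some u =>
      have hdb := hb d (PySem.List.mem_of_pyGet?_eq_some _ hd)
      have hub := hb u (PySem.List.mem_of_pyGet?_eq_some _ hu)
      simp only [Option.bind_some, hd, hu, Option.map_some]
      rw [pv_addEach_map "hh" n (pvRender evs),
        PySem.List.pyGetD_map_pyRange_of_nonneg _ n d "" hdb.1 hdb.2,
        pv_slice_hh_d,
        pv_pySetD_map_pyRange _ n d _ hdb.1 hdb.2,
        PySem.List.pyGetD_map_pyRange_of_nonneg _ n u "" hub.1 hub.2]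
      have hslice : PySem.Str.slice
          (if u = d then pvRender evs d ++ "hd" else pvRender evs u ++ "hh")
          none (some (-1)) ++ "u" = pvRender evs u ++ "hu" := by
        by_cases h : u = d
        · rw [if_pos h, pv_slice_hd_u, h]
        · rw [if_neg h, pv_slice_hh_u]
      rw [hslice, pv_pySetD_map_pyRange _ n u _ hub.1 hub.2]
      refine congrArg some (Prod.ext ?_ rfl)
      apply List.map_congr_left
      intro j _
      have hsnoc : pvRender (evs ++ [(d, u)]) j = pvRender evs j ++ pvSeg j (d, u) := by
        simp [pvRender, pv_join_append_singleton]
      rw [hsnoc]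
      unfold pvSeg
      by_cases h1 : j = u
      · simp [h1]
      · by_cases h2 : j = d
        · subst h2
          simp [h1]
        · simp [h1, h2]

theorem pv_foldA_none (n : Int) (l : List Int) :
    l.foldl (createWordsStep n) none = none := by
  induction l with
  | nil => rfl
  | cons c t ih => simpa [createWordsStep] using ih

theorem pv_foldB_none (l : List Int) :
    l.foldl createWordsAltStep none = none := by
  induction l with
  | nil => rfl
  | cons c t ih => simpa [createWordsAltStep] using ih

theorem pv_fold_eq (n : Int) : ∀ (l : List Int) (evs : List (Int × Int)) (order : List Int),
    (∀ x ∈ order, 0 ≤ x ∧ x < n) →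
    l.foldl (createWordsStep n) (some ((PySem.List.pyRange 0 n 1).map (pvRender evs), order))
    = Option.map (fun st => ((PySem.List.pyRange 0 n 1).map (pvRender st.1), st.2))
        (l.foldl createWordsAltStep (some (evs, order))) := by
  intro l
  induction l with
  | nil => intro evs order _; rfl
  | cons c t ih =>
      intro evs order hb
      rw [List.foldl_cons, List.foldl_cons, pv_step_eq n evs order c hb]
      cases hd : PySem.List.pyGet? order c with
      | none => simp [createWordsAltStep, hd, pv_foldA_none, pv_foldB_none]
      | some d =>
        cases hu : PySem.List.pyGet? order (c + 1) with
        | none => simp [createWordsAltStep, hd, hu, pv_foldA_none, pv_foldB_none]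
        | some u =>
            have hstep : createWordsAltStep (some (evs, order)) c
                = some (evs ++ [(d, u)],
                    PySem.List.pySetD (PySem.List.pySetD order c u) (c + 1) d) := by
              simp [createWordsAltStep, hd, hu]
            rw [hstep]
            apply ih
            intro x hx
            rcases pv_mem_pySetD _ _ _ _ hx with hx' | hx'
            · rcases pv_mem_pySetD _ _ _ _ hx' with hx'' | hx''
              · exact hb x hx''
              · exact hx'' ▸ hb u (PySem.List.mem_of_pyGet?_eq_some _ hu)
            · exact hx' ▸ hb d (PySem.List.mem_of_pyGet?_eq_some _ hd)

-- ===== VERDICT (by name: the statement is the Claim_ definition above) =====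
theorem createWords_spec : Claim_equal_createWords := by
  intro l n _ _
  unfold Spec_createWords createWords createWords_alt
  have hinit : (PySem.List.pyRange 0 n 1).map (fun _ => "")
      = (PySem.List.pyRange 0 n 1).map (pvRender []) :=
    List.map_congr_left (fun a _ => (pv_join_nil).symm)
  rw [hinit, pv_fold_eq n l [] (PySem.List.pyRange 0 n 1)
    (fun x hx => (PySem.List.mem_pyRange_one.mp hx))]
  cases hres : l.foldl createWordsAltStep (some ([], PySem.List.pyRange 0 n 1)) with
  | none => rfl
  | some st => simp [pv_addEach_map, pvRender]
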